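-- pv_equiv track=rewrite | github.com/hendrikhuwy-lgtm/Investment-Sample | backend/app/v2/features/research_support.py | build_sentiment_annotation
-- ===== SOURCE A (Python) =====
-- from typing import Any
--
-- def _text(value: Any) -> str:
--     return str(value or "").strip()
--
-- def build_sentiment_annotation(news_clusters: list[dict[str, Any]] | None) -> dict[str, Any] | None:
--     clusters = list(news_clusters or [])
--     if not clusters:
--         return None
--     tones = [_text(item.get("tone")).lower() for item in clusters]
--     if "worsening" in tones and "improving" in tones:
--         label, tone = "Mixed narrative tone", "warn"
--         summary = "Headline tone is mixed. Keep it as a secondary annotation, not as a decision signal."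
--     elif "worsening" in tones:
--         label, tone = "Narrative tone worsening", "warn"
--         summary = "Headline tone is leaning more negative, but it still remains a secondary evidence modifier."
--     elif "improving" in tones:
--         label, tone = "Narrative tone improving", "good"
--         summary = "Headline tone is improving, but it still remains secondary to direct market and issuer evidence."
--     else:
--         label, tone = "Narrative tone neutral", "neutral"
--         summary = "Headline tone is balanced and should stay in the background."
--     return {"label": label, "tone": tone, "summary": summary}
-- ===== SOURCE B (Python) =====
-- # Table-driven: encode the presence of the two signal tones as a 2-bit mask
-- # (bit 0 = worsening, bit 1 = improving), with early exit once both are seen,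
-- # and index a static 4-entry table with it instead of a branch chain.
-- _TABLE = (
--     ("Narrative tone neutral", "neutral",
--      "Headline tone is balanced and should stay in the background."),
--     ("Narrative tone worsening", "warn",
--      "Headline tone is leaning more negative, but it still remains a secondary evidence modifier."),
--     ("Narrative tone improving", "good",
--      "Headline tone is improving, but it still remains secondary to direct market and issuer evidence."),
--     ("Mixed narrative tone", "warn",
--      "Headline tone is mixed. Keep it as a secondary annotation, not as a decision signal."),
-- )
--
-- def build_sentiment_annotation(news_clusters):
--     if not news_clusters:
--         return None
--     mask = 0
--     for item in news_clusters:
--         t = str(item.get("tone") or "").strip().lower()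
--         mask |= (t == "worsening") | ((t == "improving") << 1)
--         if mask == 3:
--             break
--     label, tone, summary = _TABLE[mask]
--     return {"label": label, "tone": tone, "summary": summary}
-- ===== Notes on version B (the rewrite author's own statement) =====
-- stated objective: alternative
-- what changed: B drops A's tones list, membership tests and if/elif chain: it ORs each normalized tone into a 2-bit presence mask in one pass with early exit once both bits are set, then indexes a static 4-entry table with the mask to pick the label/tone/summary triple.
import Mathlib
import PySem

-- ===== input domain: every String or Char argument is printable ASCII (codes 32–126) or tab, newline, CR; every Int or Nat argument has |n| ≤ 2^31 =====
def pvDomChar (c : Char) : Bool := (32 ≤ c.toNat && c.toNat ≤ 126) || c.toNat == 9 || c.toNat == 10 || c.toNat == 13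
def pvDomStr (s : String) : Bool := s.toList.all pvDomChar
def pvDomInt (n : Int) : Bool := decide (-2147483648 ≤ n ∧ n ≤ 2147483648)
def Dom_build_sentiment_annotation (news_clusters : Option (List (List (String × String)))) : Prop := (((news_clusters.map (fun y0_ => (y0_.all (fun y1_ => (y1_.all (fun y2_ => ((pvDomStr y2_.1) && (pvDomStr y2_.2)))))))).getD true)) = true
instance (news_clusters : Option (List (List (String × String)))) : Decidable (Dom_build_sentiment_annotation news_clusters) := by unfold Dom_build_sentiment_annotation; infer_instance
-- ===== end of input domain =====

-- B replaces A's tones list, membership tests and branch chain by a 2-bit presence mask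
-- (with early exit) indexing a static 4-entry table; objective: alternative.


-- ===== PORT A =====
-- helper `_text(value) = str(value or "").strip()` applied to an Optional[str]
def pv_text (value : Option String) : String :=
  PySem.Str.strip (value.getD "")

def build_sentiment_annotation (news_clusters : Option (List (List (String × String)))) : Option (List (String × String)) :=
  let clusters := news_clusters.getD []
  if clusters = [] then none
  else
    let tones := clusters.map (fun item => PySem.Str.lower (pv_text ((PySem.Dict.mk item).get? "tone")))
    if tones.contains "worsening" && tones.contains "improving" then
      some [("label", "Mixed narrative tone"), ("tone", "warn"),
            ("summary", "Headline tone is mixed. Keep it as a secondary annotation, not as a decision signal.")]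
    else if tones.contains "worsening" then
      some [("label", "Narrative tone worsening"), ("tone", "warn"),
            ("summary", "Headline tone is leaning more negative, but it still remains a secondary evidence modifier.")]
    else if tones.contains "improving" then
      some [("label", "Narrative tone improving"), ("tone", "good"),
            ("summary", "Headline tone is improving, but it still remains secondary to direct market and issuer evidence.")]
    else
      some [("label", "Narrative tone neutral"), ("tone", "neutral"),
            ("summary", "Headline tone is balanced and should stay in the background.")]

-- ===== PORT B =====
-- the static 4-entry _TABLE of Source B, indexed by the 2-bit mask
def pvTable : Nat → String × String × String
  | 0 => ("Narrative tone neutral", "neutral",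
          "Headline tone is balanced and should stay in the background.")
  | 1 => ("Narrative tone worsening", "warn",
          "Headline tone is leaning more negative, but it still remains a secondary evidence modifier.")
  | 2 => ("Narrative tone improving", "good",
          "Headline tone is improving, but it still remains secondary to direct market and issuer evidence.")
  | _ => ("Mixed narrative tone", "warn",
          "Headline tone is mixed. Keep it as a secondary annotation, not as a decision signal.")

-- the bits ORed into the mask for one item: (t=="worsening") | ((t=="improving") << 1)
def pvBits (item : List (String × String)) : Nat :=
  let t := PySem.Str.lower (PySem.Str.strip (((PySem.Dict.mk item).get? "tone").getD ""))
  (if t = "worsening" then 1 else 0) ||| ((if t = "improving" then 1 else 0) <<< 1)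

-- the loop of Source B: accumulate the mask, breaking early once it is 3
def pvMaskLoop : List (List (String × String)) → Nat → Nat
  | [], mask => mask
  | item :: rest, mask =>
    let mask' := mask ||| pvBits item
    if mask' = 3 then mask' else pvMaskLoop rest mask'

def build_sentiment_annotation_alt (news_clusters : Option (List (List (String × String)))) : Option (List (String × String)) :=
  match news_clusters with
  | none => none
  | some [] => none
  | some clusters =>
    let mask := pvMaskLoop clusters 0
    let e := pvTable mask
    some [("label", e.1), ("tone", e.2.1), ("summary", e.2.2)]

-- ===== PRECONDITION & SPEC =====
def Spec_build_sentiment_annotation (news_clusters : Option (List (List (String × String)))) (out : Option (List (String × String))) : Prop := out = build_sentiment_annotation_alt news_clusters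
instance (news_clusters : Option (List (List (String × String)))) (out : Option (List (String × String))) : Decidable (Spec_build_sentiment_annotation news_clusters out) := by unfold Spec_build_sentiment_annotation; infer_instance

-- ===== CLAIM (what is proved, stated in full; the proofs are below) =====
def Claim_equal_build_sentiment_annotation : Prop := ∀ (news_clusters : Option (List (List (String × String)))), Dom_build_sentiment_annotation news_clusters → Spec_build_sentiment_annotation news_clusters (build_sentiment_annotation news_clusters)

-- ===== LEMMAS AND PROOFS =====
def pvNorm (item : List (String × String)) : String :=
  PySem.Str.lower (PySem.Str.strip (((PySem.Dict.mk item).get? "tone").getD ""))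

theorem pvA_norm (item : List (String × String)) :
    PySem.Str.lower (pv_text ((PySem.Dict.mk item).get? "tone")) = pvNorm item := rfl

-- the mask one would get without early exit, as a function of the two membership booleans
def pvMaskOf (cs : List (List (String × String))) : Nat :=
  (if (cs.map pvNorm).contains "worsening" then 1 else 0) |||
  (if (cs.map pvNorm).contains "improving" then 2 else 0)

theorem pvBits_eq (c : List (String × String)) :
    pvBits c = (if pvNorm c = "worsening" then 1 else 0) |||
               (if pvNorm c = "improving" then 2 else 0) := by
  simp only [pvBits, pvNorm]
  split_ifs <;> rfl

theorem pvMaskOf_le (cs : List (List (String × String))) : pvMaskOf cs ≤ 3 := by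
  unfold pvMaskOf; split_ifs <;> decide

theorem pvMaskOf_cons (c : List (String × String)) (cs : List (List (String × String))) :
    pvMaskOf (c :: cs) = pvBits c ||| pvMaskOf cs := by
  simp only [pvMaskOf, pvBits_eq, List.map_cons, List.contains_cons]
  cases hw : (cs.map pvNorm).contains "worsening" <;>
    cases hi : (cs.map pvNorm).contains "improving" <;>
      by_cases h1 : pvNorm c = "worsening" <;>
        by_cases h2 : pvNorm c = "improving" <;>
          simp only [h1, h2, Bool.or_false, Bool.or_true, beq_self_eq_true, beq_iff_eq,
            if_true, if_false] <;>
          simp [h1, h2, Ne.symm]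

theorem pvMaskLoop_eq (cs : List (List (String × String))) (m : Nat) (hm : m ≤ 3) :
    pvMaskLoop cs m = m ||| pvMaskOf cs := by
  induction cs generalizing m with
  | nil => simp [pvMaskLoop, pvMaskOf]
  | cons c rest ih =>
    have hb : pvBits c ≤ 3 := by rw [pvBits_eq]; split_ifs <;> decide
    have hm' : m ||| pvBits c ≤ 3 := by
      interval_cases m <;> interval_cases h : pvBits c <;> simp_all
    simp only [pvMaskLoop, pvMaskOf_cons, ← Nat.lor_assoc]
    split_ifs with h3
    · rw [h3]
      have := pvMaskOf_le rest
      interval_cases h : pvMaskOf rest <;> rfl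
    · exact ih _ hm'

set_option maxHeartbeats 1000000 in
theorem build_sentiment_annotation_spec : Claim_equal_build_sentiment_annotation := by
  unfold Claim_equal_build_sentiment_annotation
  intro news_clusters _
  unfold Spec_build_sentiment_annotation
  match news_clusters with
  | none => rfl
  | some [] => rfl
  | some (c :: rest) =>
    cases hw : ((c :: rest).map pvNorm).contains "worsening" <;>
      cases hi : ((c :: rest).map pvNorm).contains "improving" <;>
        simp only [build_sentiment_annotation, build_sentiment_annotation_alt,
          Option.getD_some, reduceCtorEq, reduceIte,
          pvMaskLoop_eq (c :: rest) 0 (by decide), Nat.zero_or, Nat.reduceOr, pvMaskOf,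
          pvA_norm, hw, hi, Bool.false_and, Bool.true_and, Bool.and_self] <;> rfl
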